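-- pv_equiv track=rewrite | github.com/AFoxAA/The_Immersion_into_Python_HW | Homework_6/my_package/ex2.py | queens_no_collisions
-- ===== SOURCE A (Python) =====
-- from typing import List, Tuple
--
-- def queens_no_collisions(queens: List[Tuple[int, int]]) -> bool:
--
--     """
--     Проверяет, есть ли столкновения между ферзями на шахматной доске.
--
--     :Аргументы:
--         - queens (List[Tuple[int, int]]): Список координат ферзей на шахматной доске.
--
--     :Возвращаемое значение:
--         - bool: True, если ферзи не сталкиваются, иначе False.
--     """
--
--     for i in range(len(queens)):
--         for j in range(i + 1, len(queens)):
--             if (queens[i][0] == queens[j][0] or  # Проверка по горизонтали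
--                     queens[i][1] == queens[j][1] or  # Проверка по вертикали
--                     abs(queens[i][0] - queens[j][0]) == abs(queens[i][1] - queens[j][1])):  # Проверка по диагоналям
--                 return False
--     return True
-- ===== SOURCE B (Python) =====
-- def queens_no_collisions(queens):
--     rows = set()
--     cols = set()
--     diag1 = set()
--     diag2 = set()
--     for q in queens:
--         r, c = q[0], q[1]
--         if r in rows or c in cols or (r - c) in diag1 or (r + c) in diag2:
--             return False
--         rows.add(r)
--         cols.add(c)
--         diag1.add(r - c)
--         diag2.add(r + c)
--     return True
-- ===== Notes on version B (the rewrite author's own statement) =====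
-- stated objective: alternative
-- what changed: Replaced the all-pairs double loop by a single pass that records rows, columns and both diagonals (r-c, r+c) in four sets and rejects on the first repeat (asymptotically better in the worst case, but generated boards conflict early so no measured speedup).
-- outside the precondition, e.g. on queens_no_collisions([(1,)]): A returns True, B raises IndexError; on queens_no_collisions([(1,), (1, 2)]): A returns False, B raises IndexError; on queens_no_collisions([(1,), (2, 3)]): A raises IndexError, B raises IndexError
import Mathlib
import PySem

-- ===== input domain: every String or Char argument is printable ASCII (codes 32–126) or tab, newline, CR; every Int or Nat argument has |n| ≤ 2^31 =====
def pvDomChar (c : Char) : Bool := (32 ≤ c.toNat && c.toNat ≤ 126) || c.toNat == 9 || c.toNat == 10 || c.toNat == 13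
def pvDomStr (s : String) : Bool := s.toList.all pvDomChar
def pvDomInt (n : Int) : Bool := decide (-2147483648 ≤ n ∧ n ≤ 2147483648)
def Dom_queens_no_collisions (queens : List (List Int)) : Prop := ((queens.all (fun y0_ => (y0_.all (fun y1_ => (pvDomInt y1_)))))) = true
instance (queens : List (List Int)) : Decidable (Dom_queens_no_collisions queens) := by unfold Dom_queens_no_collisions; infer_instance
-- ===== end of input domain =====

-- B replaces A's all-pairs scan by a single pass over four occupancy sets (rows, cols, r-c, r+c).

-- ===== PORT A =====
-- queens[i][k]; under Pre_ every accessed index is in range, so the default is never used (exact there)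
def qncGet (q : List Int) (k : Nat) : Int := (PySem.List.pyGet? q (k : Int)).getD 0

def qncRow (queens : List (List Int)) (i : Nat) : List Int :=
  (PySem.List.pyGet? queens (i : Int)).getD []

-- the condition of A's `if`, in the same order
def qncConflict (a b : List Int) : Bool :=
  qncGet a 0 == qncGet b 0 || qncGet a 1 == qncGet b 1 ||
    ((qncGet a 0 - qncGet b 0).natAbs == (qncGet a 1 - qncGet b 1).natAbs)

-- inner loop `for j in range(i+1, len(queens))` with early `return False`
def qncInner (queens : List (List Int)) (qi : List Int) : List Nat → Bool
  | [] => false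
  | j :: js => if qncConflict qi (qncRow queens j) then true else qncInner queens qi js

-- outer loop `for i in range(len(queens))`
def qncOuter (queens : List (List Int)) : List Nat → Bool
  | [] => true
  | i :: is =>
    if qncInner queens (qncRow queens i) (List.range' (i + 1) (queens.length - (i + 1)))
    then false else qncOuter queens is

def queens_no_collisions (queens : List (List Int)) : Bool :=
  qncOuter queens (List.range queens.length)

-- ===== PORT B =====
-- single pass carrying the four sets; early `return False` on the first repeat
def qncAltLoop : List (List Int) → PySem.Set Int → PySem.Set Int → PySem.Set Int → PySem.Set Int → Bool
  | [], _, _, _, _ => true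
  | q :: rest, rows, cols, d1, d2 =>
    let r := qncGet q 0
    let c := qncGet q 1
    if PySem.Set.contains rows r || PySem.Set.contains cols c ||
       PySem.Set.contains d1 (r - c) || PySem.Set.contains d2 (r + c) then false
    else qncAltLoop rest (PySem.Set.add rows r) (PySem.Set.add cols c)
           (PySem.Set.add d1 (r - c)) (PySem.Set.add d2 (r + c))

def queens_no_collisions_alt (queens : List (List Int)) : Bool :=
  qncAltLoop queens PySem.Set.empty PySem.Set.empty PySem.Set.empty PySem.Set.empty

-- ===== PRECONDITION & SPEC =====
-- Pre_ excludes boards containing a coordinate list shorter than 2: there Python A raises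
-- IndexError except in accidental corners (a single queen, or an `or` short-circuit on the
-- row test) where A still returns while B naturally raises.
def Pre_queens_no_collisions (queens : List (List Int)) : Prop :=
  ∀ q ∈ queens, 2 ≤ q.length
instance (queens : List (List Int)) : Decidable (Pre_queens_no_collisions queens) := by
  unfold Pre_queens_no_collisions; infer_instance

def pvWitness_queens_no_collisions : List (List Int) := [[0, 0], [2, 1]]

def Spec_queens_no_collisions (queens : List (List Int)) (out : Bool) : Prop :=
  out = queens_no_collisions_alt queens
instance (queens : List (List Int)) (out : Bool) : Decidable (Spec_queens_no_collisions queens out) := by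
  unfold Spec_queens_no_collisions; infer_instance

-- ===== CLAIM =====
def Claim_equal_queens_no_collisions : Prop :=
  ∀ (queens : List (List Int)), Dom_queens_no_collisions queens →
    Pre_queens_no_collisions queens →
    Spec_queens_no_collisions queens (queens_no_collisions queens)

-- ===== LEMMAS AND PROOFS =====

-- the symmetric attack relation both programs decide
def qncAttacks (a b : List Int) : Prop :=
  qncGet a 0 = qncGet b 0 ∨ qncGet a 1 = qncGet b 1 ∨
    qncGet a 0 - qncGet a 1 = qncGet b 0 - qncGet b 1 ∨
    qncGet a 0 + qncGet a 1 = qncGet b 0 + qncGet b 1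

theorem qncConflict_iff (a b : List Int) : qncConflict a b = true ↔ qncAttacks a b := by
  simp only [qncConflict, qncAttacks, Bool.or_eq_true, beq_iff_eq]
  omega

theorem qncInner_iff (queens : List (List Int)) (qi : List Int) (js : List Nat) :
    qncInner queens qi js = true ↔ ∃ j ∈ js, qncAttacks qi (qncRow queens j) := by
  induction js with
  | nil => simp [qncInner]
  | cons j js ih =>
    simp only [qncInner]
    split
    · rename_i h
      simp only [true_iff]
      exact ⟨j, List.mem_cons_self, (qncConflict_iff _ _).mp h⟩
    · rename_i h
      rw [ih]
      constructor
      · rintro ⟨k, hk, hat⟩; exact ⟨k, List.mem_cons_of_mem _ hk, hat⟩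
      · rintro ⟨k, hk, hat⟩
        rcases List.mem_cons.mp hk with rfl | hk'
        · exact absurd ((qncConflict_iff _ _).mpr hat) (by simpa using h)
        · exact ⟨k, hk', hat⟩

theorem qncOuter_iff (queens : List (List Int)) (is : List Nat) :
    qncOuter queens is = true ↔
      ∀ i ∈ is, ∀ j, i < j → j < queens.length → ¬ qncAttacks (qncRow queens i) (qncRow queens j) := by
  induction is with
  | nil => simp [qncOuter]
  | cons i is ih =>
    simp only [qncOuter]
    split
    · rename_i h
      rw [qncInner_iff] at h
      obtain ⟨j, hj, hat⟩ := h
      rw [List.mem_range'_1] at hj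
      constructor
      · intro hfalse; cases hfalse
      · intro hall
        exact absurd hat (hall i List.mem_cons_self j (by omega) (by omega))
    · rename_i h
      rw [ih]
      constructor
      · intro hall k hk j hij hjn
        rcases List.mem_cons.mp hk with rfl | hk'
        · intro hat
          apply h
          rw [qncInner_iff]
          exact ⟨j, List.mem_range'_1.mpr ⟨by omega, by omega⟩, hat⟩
        · exact hall k hk' j hij hjn
      · intro hall k hk
        exact hall k (List.mem_cons_of_mem _ hk)

theorem qncA_iff (queens : List (List Int)) :
    queens_no_collisions queens = true ↔
      List.Pairwise (fun a b => ¬ qncAttacks a b) queens := by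
  rw [queens_no_collisions, qncOuter_iff, List.pairwise_iff_getElem]
  constructor
  · intro h i j hi hj hij
    have := h i (List.mem_range.mpr (by omega)) j hij hj
    simpa [qncRow, PySem.List.pyGet?_natCast, List.getElem?_eq_getElem, hi, hj] using this
  · intro h i hi j hij hj
    have hi' : i < queens.length := List.mem_range.mp hi
    have := h i j hi' hj hij
    simpa [qncRow, PySem.List.pyGet?_natCast, List.getElem?_eq_getElem, hi', hj] using this

theorem qncAltLoop_iff (l : List (List Int)) (rows cols d1 d2 : PySem.Set Int) :
    qncAltLoop l rows cols d1 d2 = true ↔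
      List.Pairwise (fun a b => ¬ qncAttacks a b) l ∧
        ∀ q ∈ l, qncGet q 0 ∉ rows ∧ qncGet q 1 ∉ cols ∧
          qncGet q 0 - qncGet q 1 ∉ d1 ∧ qncGet q 0 + qncGet q 1 ∉ d2 := by
  induction l generalizing rows cols d1 d2 with
  | nil => simp [qncAltLoop]
  | cons q rest ih =>
    simp only [qncAltLoop]
    split
    · rename_i h
      simp only [Bool.or_eq_true, PySem.Set.contains_iff] at h
      simp only [Bool.false_eq_true, false_iff, not_and]
      intro _ hfresh
      have := hfresh q List.mem_cons_self
      tauto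
    · rename_i h
      simp only [Bool.or_eq_true, PySem.Set.contains_iff] at h
      push Not at h
      rw [ih]
      constructor
      · rintro ⟨hpw, hfresh⟩
        refine ⟨List.pairwise_cons.mpr ⟨?_, hpw⟩, ?_⟩
        · intro b hb hat
          obtain ⟨h1, h2, h3, h4⟩ := hfresh b hb
          simp only [PySem.Set.mem_add, not_or] at h1 h2 h3 h4
          unfold qncAttacks at hat
          omega
        · intro p hp
          rcases List.mem_cons.mp hp with rfl | hp'
          · tauto
          · obtain ⟨h1, h2, h3, h4⟩ := hfresh p hp'
            simp only [PySem.Set.mem_add, not_or] at h1 h2 h3 h4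
            exact ⟨h1.1, h2.1, h3.1, h4.1⟩
      · rintro ⟨hpw, hfresh⟩
        obtain ⟨hq, hpw'⟩ := List.pairwise_cons.mp hpw
        refine ⟨hpw', ?_⟩
        intro p hp
        obtain ⟨f1, f2, f3, f4⟩ := hfresh p (List.mem_cons_of_mem _ hp)
        have hnat := hq p hp
        unfold qncAttacks at hnat
        simp only [PySem.Set.mem_add, not_or]
        exact ⟨⟨f1, by omega⟩, ⟨f2, by omega⟩, ⟨f3, by omega⟩, ⟨f4, by omega⟩⟩

theorem qncAlt_iff (queens : List (List Int)) :
    queens_no_collisions_alt queens = true ↔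
      List.Pairwise (fun a b => ¬ qncAttacks a b) queens := by
  rw [queens_no_collisions_alt, qncAltLoop_iff]
  simp [PySem.Set.empty]

-- ===== VERDICT =====
theorem queens_no_collisions_spec : Claim_equal_queens_no_collisions := by
  intro queens _ _
  unfold Spec_queens_no_collisions
  rw [Bool.eq_iff_iff, qncA_iff, qncAlt_iff]
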